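-- pv_equiv track=rewrite | github.com/Shebulan-Joshwel/AIML-Recruitment-platform | backend/apps/job_management/analytics.py | _education_level
-- ===== SOURCE A (Python) =====
-- def _education_level(text: str) -> int:
--   """Very rough numeric level for education comparison."""
--   t = text.lower()
--   if any(k in t for k in ["phd", "doctorate"]):
--     return 4
--   if any(k in t for k in ["mtech", "msc", "masters", "master of"]):
--     return 3
--   if any(k in t for k in ["btech", "bachelor", "bsc", "b.e", "b.e.", "b.eng"]):
--     return 2
--   if any(k in t for k in ["diploma", "associate"]):
--     return 1
--   return 0
-- ===== SOURCE B (Python) =====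
-- _KW_LEVEL = {
--     "phd": 4, "doctorate": 4,
--     "mtech": 3, "msc": 3, "masters": 3, "master of": 3,
--     "btech": 2, "bachelor": 2, "bsc": 2, "b.e": 2, "b.e.": 2, "b.eng": 2,
--     "diploma": 1, "associate": 1,
-- }
--
-- def _education_level(text: str) -> int:
--   """Very rough numeric level for education comparison."""
--   t = text.lower()
--   best = 0
--   for i in range(len(t)):
--     for kw, lvl in _KW_LEVEL.items():
--       if lvl > best and t.startswith(kw, i):
--         best = lvl
--   return best
-- ===== Notes on version B (the rewrite author's own statement) =====
-- stated objective: alternative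
-- what changed: Instead of A's keyword-driven cascade of `in` substring tests per level group, B flattens the groups into one keyword->level map and scans the text once left-to-right, prefix-matching every keyword at each position and keeping the best level seen (text-position-driven traversal, default 0).
import Mathlib
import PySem

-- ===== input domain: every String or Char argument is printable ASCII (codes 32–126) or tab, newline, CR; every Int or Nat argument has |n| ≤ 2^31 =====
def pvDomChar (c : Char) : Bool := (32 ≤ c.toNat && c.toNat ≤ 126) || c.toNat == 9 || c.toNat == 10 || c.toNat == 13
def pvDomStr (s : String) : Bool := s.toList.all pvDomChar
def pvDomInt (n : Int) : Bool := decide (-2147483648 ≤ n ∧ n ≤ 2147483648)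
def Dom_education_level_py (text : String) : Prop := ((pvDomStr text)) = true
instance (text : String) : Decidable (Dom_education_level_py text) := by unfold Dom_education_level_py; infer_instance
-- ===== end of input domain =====

-- B replaces A's keyword-driven `in`-cascade by a single left-to-right scan of the text that prefix-matches a flat keyword→level table at each position, keeping the best level seen (objective: alternative).


-- ===== PORT A =====
def education_level_py (text : String) : Int :=
  let t := PySem.Str.lower text
  if ["phd", "doctorate"].any (fun k => PySem.Str.isIn k t) then 4
  else if ["mtech", "msc", "masters", "master of"].any (fun k => PySem.Str.isIn k t) then 3
  else if ["btech", "bachelor", "bsc", "b.e", "b.e.", "b.eng"].any (fun k => PySem.Str.isIn k t) then 2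
  else if ["diploma", "associate"].any (fun k => PySem.Str.isIn k t) then 1
  else 0

-- ===== PORT B =====
-- flat keyword → level table (_KW_LEVEL in Source B; insertion order)
def kwLevel : List (String × Int) :=
  [("phd", 4), ("doctorate", 4),
   ("mtech", 3), ("msc", 3), ("masters", 3), ("master of", 3),
   ("btech", 2), ("bachelor", 2), ("bsc", 2), ("b.e", 2), ("b.e.", 2), ("b.eng", 2),
   ("diploma", 1), ("associate", 1)]

-- `t.startswith(kw, i)` with 0 ≤ i < len(t) (i comes from range(len(t))) is exactly
-- the prefix test `Chars.startswith (tl.drop i.toNat) kw.toList`.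
def education_level_py_alt (text : String) : Int :=
  let t := PySem.Str.lower text
  let tl := t.toList
  (PySem.List.pyRange 0 (tl.length : Int) 1).foldl
    (fun best i =>
      kwLevel.foldl
        (fun b p =>
          if decide (b < p.2) && PySem.Chars.startswith (tl.drop i.toNat) p.1.toList then p.2 else b)
        best)
    0

-- ===== PRECONDITION & SPEC =====
def Spec_education_level_py (text : String) (out : Int) : Prop := out = education_level_py_alt text
instance (text : String) (out : Int) : Decidable (Spec_education_level_py text out) := by unfold Spec_education_level_py; infer_instance

-- ===== CLAIM =====
def Claim_equal_education_level_py : Prop := ∀ (text : String), Dom_education_level_py text → Spec_education_level_py text (education_level_py text)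

-- ===== LEMMAS AND PROOFS =====

-- the multiset of levels matched anywhere in cs, as a flat list
def matchedLevels (cs : List Char) : List Int :=
  (PySem.List.pyRange 0 (cs.length : Int) 1).flatMap
    (fun i => (kwLevel.filter (fun p => PySem.Chars.startswith (cs.drop i.toNat) p.1.toList)).map (·.2))

-- the conditional best-update fold is the max-fold over the matched levels
lemma condfold (c : (String × Int) → Bool) (l : List (String × Int)) (b : Int) :
    l.foldl (fun b p => if decide (b < p.2) && c p then p.2 else b) b
      = ((l.filter c).map (·.2)).foldl max b := by
  induction l generalizing b with
  | nil => rfl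
  | cons hd tl ih =>
      by_cases h : c hd = true
      · have hstep : (if decide (b < hd.2) && c hd then hd.2 else b) = max b hd.2 := by
          rw [max_def]; simp only [h, Bool.and_true]; split_ifs <;> simp_all <;> omega
        rw [List.foldl_cons, hstep, List.filter_cons_of_pos h, List.map_cons, List.foldl_cons]
        exact ih _
      · have hstep : (if decide (b < hd.2) && c hd then hd.2 else b) = b := by simp [h]
        rw [List.foldl_cons, hstep, List.filter_cons_of_neg h]
        exact ih _

lemma alt_eq_foldl_max (text : String) :
    education_level_py_alt text = (matchedLevels (PySem.Str.lower text).toList).foldl max 0 := by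
  unfold education_level_py_alt matchedLevels
  rw [List.foldl_flatMap]
  simp only [condfold]

-- upper bound for a max-fold
lemma foldl_max_le (l : List Int) : ∀ (a c : Int), a ≤ c → (∀ x ∈ l, x ≤ c) → l.foldl max a ≤ c := by
  induction l with
  | nil => exact fun a c ha _ => ha
  | cons hd tl ih =>
      intro a c ha h
      exact ih _ _ (max_le ha (h hd (by simp))) (fun x hx => h x (by simp [hx]))

lemma foldl_max_char (l : List Int) (R : Int) (h0 : 0 ≤ R)
    (hub : ∀ x ∈ l, x ≤ R) (hmem : R = 0 ∨ R ∈ l) : l.foldl max 0 = R := by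
  refine le_antisymm (foldl_max_le l 0 R h0 hub) ?_
  rcases hmem with h | h
  · exact h ▸ (PySem.List.le_foldl_max l 0).1
  · exact (PySem.List.le_foldl_max l 0).2 R h

-- a (nonempty) keyword matches at some scanned position iff it occurs as a substring
lemma occ_iff (kw cs : List Char) (hkw : kw ≠ []) :
    (∃ i ∈ PySem.List.pyRange 0 (cs.length : Int) 1,
        PySem.Chars.startswith (cs.drop i.toNat) kw = true)
      ↔ PySem.Chars.isIn kw cs = true := by
  rw [← PySem.Chars.exists_prefix_drop_iff_isIn]
  constructor
  · rintro ⟨i, _, hs⟩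
    exact ⟨i.toNat, (PySem.Chars.startswith_iff _ _).1 hs⟩
  · rintro ⟨j, hj⟩
    have hjlt : j < cs.length := by
      by_contra h
      have : cs.drop j = [] := List.drop_eq_nil_of_le (by omega)
      rw [this] at hj
      exact hkw (List.prefix_nil.mp hj)
    refine ⟨(j : Int), PySem.List.mem_pyRange_one.2 (by omega), ?_⟩
    simpa using (PySem.Chars.startswith_iff _ _).2 hj

-- membership in matchedLevels, per level group
lemma mem_matchedLevels (cs : List Char) (x : Int) (hx : x ∈ matchedLevels cs) :
    (x = 4 ∧ (PySem.Chars.isIn "phd".toList cs ∨ PySem.Chars.isIn "doctorate".toList cs)) ∨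
    (x = 3 ∧ (PySem.Chars.isIn "mtech".toList cs ∨ PySem.Chars.isIn "msc".toList cs ∨
              PySem.Chars.isIn "masters".toList cs ∨ PySem.Chars.isIn "master of".toList cs)) ∨
    (x = 2 ∧ (PySem.Chars.isIn "btech".toList cs ∨ PySem.Chars.isIn "bachelor".toList cs ∨
              PySem.Chars.isIn "bsc".toList cs ∨ PySem.Chars.isIn "b.e".toList cs ∨
              PySem.Chars.isIn "b.e.".toList cs ∨ PySem.Chars.isIn "b.eng".toList cs)) ∨
    (x = 1 ∧ (PySem.Chars.isIn "diploma".toList cs ∨ PySem.Chars.isIn "associate".toList cs)) := by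
  unfold matchedLevels kwLevel at hx
  simp only [List.mem_flatMap, List.mem_map, List.mem_filter] at hx
  obtain ⟨i, hi, p, ⟨hp, hmatch⟩, hxp⟩ := hx
  have hocc : ∀ (kw : List Char), kw ≠ [] → p.1.toList = kw →
      PySem.Chars.isIn kw cs = true := by
    intro kw hne he
    exact (occ_iff kw cs hne).1 ⟨i, hi, he ▸ hmatch⟩
  fin_cases hp <;> simp_all

-- conversely: an occurring keyword puts its level into matchedLevels
lemma level_mem_matchedLevels (cs : List Char) (kw : String) (lvl : Int)
    (hp : (kw, lvl) ∈ kwLevel) (hkw : kw.toList ≠ [])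
    (hin : PySem.Chars.isIn kw.toList cs = true) : lvl ∈ matchedLevels cs := by
  obtain ⟨i, hi, hs⟩ := (occ_iff kw.toList cs hkw).2 hin
  unfold matchedLevels
  simp only [List.mem_flatMap, List.mem_map, List.mem_filter]
  exact ⟨i, hi, (kw, lvl), ⟨hp, hs⟩, rfl⟩

-- each group's level is matched when one of its keywords occurs
lemma g4_mem (cs : List Char)
    (h : (PySem.Chars.isIn "phd".toList cs || PySem.Chars.isIn "doctorate".toList cs) = true) :
    4 ∈ matchedLevels cs := by
  simp only [Bool.or_eq_true] at h
  rcases h with h | h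
  · exact level_mem_matchedLevels cs "phd" 4 (by simp [kwLevel]) (by decide) h
  · exact level_mem_matchedLevels cs "doctorate" 4 (by simp [kwLevel]) (by decide) h

lemma g3_mem (cs : List Char)
    (h : (PySem.Chars.isIn "mtech".toList cs || (PySem.Chars.isIn "msc".toList cs ||
          (PySem.Chars.isIn "masters".toList cs || PySem.Chars.isIn "master of".toList cs))) = true) :
    3 ∈ matchedLevels cs := by
  simp only [Bool.or_eq_true] at h
  rcases h with h | h | h | h
  · exact level_mem_matchedLevels cs "mtech" 3 (by simp [kwLevel]) (by decide) h
  · exact level_mem_matchedLevels cs "msc" 3 (by simp [kwLevel]) (by decide) h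
  · exact level_mem_matchedLevels cs "masters" 3 (by simp [kwLevel]) (by decide) h
  · exact level_mem_matchedLevels cs "master of" 3 (by simp [kwLevel]) (by decide) h

lemma g2_mem (cs : List Char)
    (h : (PySem.Chars.isIn "btech".toList cs || (PySem.Chars.isIn "bachelor".toList cs ||
          (PySem.Chars.isIn "bsc".toList cs || (PySem.Chars.isIn "b.e".toList cs ||
          (PySem.Chars.isIn "b.e.".toList cs || PySem.Chars.isIn "b.eng".toList cs))))) = true) :
    2 ∈ matchedLevels cs := by
  simp only [Bool.or_eq_true] at h
  rcases h with h | h | h | h | h | h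
  · exact level_mem_matchedLevels cs "btech" 2 (by simp [kwLevel]) (by decide) h
  · exact level_mem_matchedLevels cs "bachelor" 2 (by simp [kwLevel]) (by decide) h
  · exact level_mem_matchedLevels cs "bsc" 2 (by simp [kwLevel]) (by decide) h
  · exact level_mem_matchedLevels cs "b.e" 2 (by simp [kwLevel]) (by decide) h
  · exact level_mem_matchedLevels cs "b.e." 2 (by simp [kwLevel]) (by decide) h
  · exact level_mem_matchedLevels cs "b.eng" 2 (by simp [kwLevel]) (by decide) h

lemma g1_mem (cs : List Char)
    (h : (PySem.Chars.isIn "diploma".toList cs || PySem.Chars.isIn "associate".toList cs) = true) :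
    1 ∈ matchedLevels cs := by
  simp only [Bool.or_eq_true] at h
  rcases h with h | h
  · exact level_mem_matchedLevels cs "diploma" 1 (by simp [kwLevel]) (by decide) h
  · exact level_mem_matchedLevels cs "associate" 1 (by simp [kwLevel]) (by decide) h

-- upper bounds on matched levels under falsified higher groups
lemma ub4 (cs : List Char) : ∀ x ∈ matchedLevels cs, x ≤ 4 := by
  intro x hx
  rcases mem_matchedLevels cs x hx with ⟨hx', _⟩ | ⟨hx', _⟩ | ⟨hx', _⟩ | ⟨hx', _⟩ <;>
    subst hx' <;> norm_num

lemma ub3 (cs : List Char)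
    (h4 : ¬ (PySem.Chars.isIn "phd".toList cs || PySem.Chars.isIn "doctorate".toList cs) = true) :
    ∀ x ∈ matchedLevels cs, x ≤ 3 := by
  intro x hx
  rcases mem_matchedLevels cs x hx with ⟨hx', hg⟩ | ⟨hx', _⟩ | ⟨hx', _⟩ | ⟨hx', _⟩ <;> subst hx'
  · exact absurd (by simp only [Bool.or_eq_true]; exact hg) h4
  all_goals norm_num

lemma ub2 (cs : List Char)
    (h4 : ¬ (PySem.Chars.isIn "phd".toList cs || PySem.Chars.isIn "doctorate".toList cs) = true)
    (h3 : ¬ (PySem.Chars.isIn "mtech".toList cs || (PySem.Chars.isIn "msc".toList cs ||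
        (PySem.Chars.isIn "masters".toList cs || PySem.Chars.isIn "master of".toList cs))) = true) :
    ∀ x ∈ matchedLevels cs, x ≤ 2 := by
  intro x hx
  rcases mem_matchedLevels cs x hx with ⟨hx', hg⟩ | ⟨hx', hg⟩ | ⟨hx', _⟩ | ⟨hx', _⟩ <;> subst hx'
  · exact absurd (by simp only [Bool.or_eq_true]; exact hg) h4
  · exact absurd (by simp only [Bool.or_eq_true]; tauto) h3
  all_goals norm_num

lemma ub1 (cs : List Char)
    (h4 : ¬ (PySem.Chars.isIn "phd".toList cs || PySem.Chars.isIn "doctorate".toList cs) = true)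
    (h3 : ¬ (PySem.Chars.isIn "mtech".toList cs || (PySem.Chars.isIn "msc".toList cs ||
        (PySem.Chars.isIn "masters".toList cs || PySem.Chars.isIn "master of".toList cs))) = true)
    (h2 : ¬ (PySem.Chars.isIn "btech".toList cs || (PySem.Chars.isIn "bachelor".toList cs ||
        (PySem.Chars.isIn "bsc".toList cs || (PySem.Chars.isIn "b.e".toList cs ||
        (PySem.Chars.isIn "b.e.".toList cs || PySem.Chars.isIn "b.eng".toList cs))))) = true) :
    ∀ x ∈ matchedLevels cs, x ≤ 1 := by
  intro x hx
  rcases mem_matchedLevels cs x hx with ⟨hx', hg⟩ | ⟨hx', hg⟩ | ⟨hx', hg⟩ | ⟨hx', _⟩ <;> subst hx'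
  · exact absurd (by simp only [Bool.or_eq_true]; exact hg) h4
  · exact absurd (by simp only [Bool.or_eq_true]; tauto) h3
  · exact absurd (by simp only [Bool.or_eq_true]; tauto) h2
  · norm_num

lemma ub0 (cs : List Char)
    (h4 : ¬ (PySem.Chars.isIn "phd".toList cs || PySem.Chars.isIn "doctorate".toList cs) = true)
    (h3 : ¬ (PySem.Chars.isIn "mtech".toList cs || (PySem.Chars.isIn "msc".toList cs ||
        (PySem.Chars.isIn "masters".toList cs || PySem.Chars.isIn "master of".toList cs))) = true)
    (h2 : ¬ (PySem.Chars.isIn "btech".toList cs || (PySem.Chars.isIn "bachelor".toList cs ||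
        (PySem.Chars.isIn "bsc".toList cs || (PySem.Chars.isIn "b.e".toList cs ||
        (PySem.Chars.isIn "b.e.".toList cs || PySem.Chars.isIn "b.eng".toList cs))))) = true)
    (h1 : ¬ (PySem.Chars.isIn "diploma".toList cs || PySem.Chars.isIn "associate".toList cs) = true) :
    ∀ x ∈ matchedLevels cs, x ≤ 0 := by
  intro x hx
  rcases mem_matchedLevels cs x hx with ⟨hx', hg⟩ | ⟨hx', hg⟩ | ⟨hx', hg⟩ | ⟨hx', hg⟩ <;> subst hx'
  · exact absurd (by simp only [Bool.or_eq_true]; exact hg) h4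
  · exact absurd (by simp only [Bool.or_eq_true]; tauto) h3
  · exact absurd (by simp only [Bool.or_eq_true]; tauto) h2
  · exact absurd (by simp only [Bool.or_eq_true]; exact hg) h1

-- ===== VERDICT =====
set_option maxHeartbeats 1000000 in
theorem education_level_py_spec : Claim_equal_education_level_py := by
  intro text _
  unfold Spec_education_level_py
  rw [alt_eq_foldl_max]
  set cs := (PySem.Str.lower text).toList with hcs
  unfold education_level_py
  simp only [List.any_cons, List.any_nil, PySem.Str.isIn_eq, ← hcs, Bool.or_false]
  by_cases hg4 : (PySem.Chars.isIn "phd".toList cs || PySem.Chars.isIn "doctorate".toList cs) = true <;>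
  by_cases hg3 : (PySem.Chars.isIn "mtech".toList cs || (PySem.Chars.isIn "msc".toList cs ||
      (PySem.Chars.isIn "masters".toList cs || PySem.Chars.isIn "master of".toList cs))) = true <;>
  by_cases hg2 : (PySem.Chars.isIn "btech".toList cs || (PySem.Chars.isIn "bachelor".toList cs ||
      (PySem.Chars.isIn "bsc".toList cs || (PySem.Chars.isIn "b.e".toList cs ||
      (PySem.Chars.isIn "b.e.".toList cs || PySem.Chars.isIn "b.eng".toList cs))))) = true <;>
  by_cases hg1 : (PySem.Chars.isIn "diploma".toList cs || PySem.Chars.isIn "associate".toList cs) = true <;>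
  simp only [hg4, hg3, hg2, hg1, Bool.false_eq_true, if_false, if_pos] <;>
  (refine Eq.symm (foldl_max_char _ _ (by norm_num) ?_ ?_) <;>
    first
      | exact ub4 cs
      | exact ub3 cs hg4
      | exact ub2 cs hg4 hg3
      | exact ub1 cs hg4 hg3 hg2
      | exact ub0 cs hg4 hg3 hg2 hg1
      | exact Or.inl rfl
      | exact Or.inr (g4_mem cs hg4)
      | exact Or.inr (g3_mem cs hg3)
      | exact Or.inr (g2_mem cs hg2)
      | exact Or.inr (g1_mem cs hg1))
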